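-- pv_equiv track=rewrite | github.com/segunemma2003/pmsapi | properties/utils.py | normalize_amenities
-- ===== SOURCE A (Python) =====
-- from typing import Dict, List, Any
--
-- def normalize_amenities(amenities_list: List[str]) -> List[str]:
--     """Normalize amenity names to standard format"""
--     if not isinstance(amenities_list, list):
--         return []
--
--     valid_amenities = [
--         'wifi', 'kitchen', 'tv', 'air_conditioning', 'parking', 'pool',
--         'washer', 'dryer', 'dishwasher', 'gym', 'hot_tub', 'balcony', 'garden'
--     ]
--
--     normalized = []
--
--     for amenity in amenities_list:
--         if not isinstance(amenity, str):
--             continue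
--
--         amenity_lower = amenity.lower().strip()
--
--         # Direct match
--         if amenity_lower in valid_amenities:
--             normalized.append(amenity_lower)
--             continue
--
--         # Fuzzy matching
--         if 'wifi' in amenity_lower or 'internet' in amenity_lower:
--             normalized.append('wifi')
--         elif 'kitchen' in amenity_lower:
--             normalized.append('kitchen')
--         elif 'tv' in amenity_lower or 'television' in amenity_lower:
--             normalized.append('tv')
--         elif 'air' in amenity_lower and ('con' in amenity_lower or 'cool' in amenity_lower):
--             normalized.append('air_conditioning')
--         elif 'parking' in amenity_lower or 'garage' in amenity_lower:
--             normalized.append('parking')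
--         elif 'pool' in amenity_lower or 'swimming' in amenity_lower:
--             normalized.append('pool')
--         elif 'washer' in amenity_lower or 'washing' in amenity_lower:
--             normalized.append('washer')
--         elif 'dryer' in amenity_lower:
--             normalized.append('dryer')
--         elif 'dishwasher' in amenity_lower:
--             normalized.append('dishwasher')
--         elif 'gym' in amenity_lower or 'fitness' in amenity_lower:
--             normalized.append('gym')
--         elif 'hot tub' in amenity_lower or 'jacuzzi' in amenity_lower:
--             normalized.append('hot_tub')
--         elif 'balcony' in amenity_lower or 'terrace' in amenity_lower:
--             normalized.append('balcony')
--         elif 'garden' in amenity_lower or 'yard' in amenity_lower: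
--             normalized.append('garden')
--
--     return list(set(normalized))  # Remove duplicates
-- ===== SOURCE B (Python) =====
-- VALID = frozenset(('wifi', 'kitchen', 'tv', 'air_conditioning', 'parking', 'pool',
--                    'washer', 'dryer', 'dishwasher', 'gym', 'hot_tub', 'balcony', 'garden'))
--
-- # priority, canonical name, AND-ed keyword groups (any keyword of each group must occur)
-- RULES = [
--     (0, 'wifi', (('wifi', 'internet'),)),
--     (1, 'kitchen', (('kitchen',),)),
--     (2, 'tv', (('tv', 'television'),)),
--     (3, 'air_conditioning', (('air',), ('con', 'cool'))),
--     (4, 'parking', (('parking', 'garage'),)),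
--     (5, 'pool', (('pool', 'swimming'),)),
--     (6, 'washer', (('washer', 'washing'),)),
--     (7, 'dryer', (('dryer',),)),
--     (8, 'dishwasher', (('dishwasher',),)),
--     (9, 'gym', (('gym', 'fitness'),)),
--     (10, 'hot_tub', (('hot tub', 'jacuzzi'),)),
--     (11, 'balcony', (('balcony', 'terrace'),)),
--     (12, 'garden', (('garden', 'yard'),)),
-- ]
--
--
-- def _fires(groups, s):
--     """Does every keyword group have at least one keyword occurring in s?"""
--     for grp in groups:
--         for k in grp:
--             if k in s:
--                 break
--         else:
--             return False
--     return True
--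
--
-- def _candidates(s):
--     """Every (priority, canonical) pair applicable to s; exact match outranks all rules."""
--     cands = [(-1, s)] if s in VALID else []
--     for pr, canon, groups in RULES:
--         if _fires(groups, s):
--             cands.append((pr, canon))
--     return cands
--
--
-- def _classify(s):
--     """Score all applicable rules and keep the minimum-priority candidate (no early exit)."""
--     cands = _candidates(s)
--     return min(cands, key=lambda t: t[0])[1] if cands else None
--
--
-- def normalize_amenities(amenities_list):
--     """Normalize amenity names to standard format"""
--     if not isinstance(amenities_list, list):
--         return []
--     return list({c for c in (_classify(a.lower().strip())
--                              for a in amenities_list if isinstance(a, str))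
--                  if c is not None})
-- ===== Notes on version B (the rewrite author's own statement) =====
-- stated objective: alternative
-- what changed: Per string, A walks an ordered if/elif chain and stops at the first matching rule; B instead collects ALL applicable (priority, canonical) candidates - exact match as priority -1 plus every fired rule of a declarative keyword-group table - and selects the minimum-priority one with min(), building the final set directly by a set comprehension instead of A's append-loop plus list(set(...)).
import Mathlib
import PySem

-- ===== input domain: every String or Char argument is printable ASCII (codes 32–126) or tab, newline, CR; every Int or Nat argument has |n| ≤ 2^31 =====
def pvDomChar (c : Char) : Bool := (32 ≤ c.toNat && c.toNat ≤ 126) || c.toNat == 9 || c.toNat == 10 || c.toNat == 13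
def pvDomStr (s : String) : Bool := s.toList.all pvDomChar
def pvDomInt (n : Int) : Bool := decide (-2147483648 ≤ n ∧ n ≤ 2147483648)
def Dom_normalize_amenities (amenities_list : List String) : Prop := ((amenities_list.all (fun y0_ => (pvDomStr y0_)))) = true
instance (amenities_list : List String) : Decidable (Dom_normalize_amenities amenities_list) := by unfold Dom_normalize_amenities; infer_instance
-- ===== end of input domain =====

-- B replaces A's ordered first-match if/elif chain by scoring ALL applicable rules
-- (exact match = priority -1, fired table rules by index) and taking the minimum-priority
-- candidate; the result set is built directly by a comprehension (objective: alternative).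
-- Both Pythons return a list of a set (hash order); both ports use PySem.Set.ofList
-- (first occurrences) and outputs are compared as sets.

-- ===== PORT A =====
def pvVA : List String :=
  ["wifi", "kitchen", "tv", "air_conditioning", "parking", "pool",
   "washer", "dryer", "dishwasher", "gym", "hot_tub", "balcony", "garden"]
def pvAstep (normalized : List String) (amenity : String) : List String :=
  let s := PySem.Str.strip (PySem.Str.lower amenity)
  if pvVA.contains s then normalized ++ [s]
  else if PySem.Str.isIn "wifi" s || PySem.Str.isIn "internet" s then normalized ++ ["wifi"]
  else if PySem.Str.isIn "kitchen" s then normalized ++ ["kitchen"]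
  else if PySem.Str.isIn "tv" s || PySem.Str.isIn "television" s then normalized ++ ["tv"]
  else if PySem.Str.isIn "air" s && (PySem.Str.isIn "con" s || PySem.Str.isIn "cool" s) then normalized ++ ["air_conditioning"]
  else if PySem.Str.isIn "parking" s || PySem.Str.isIn "garage" s then normalized ++ ["parking"]
  else if PySem.Str.isIn "pool" s || PySem.Str.isIn "swimming" s then normalized ++ ["pool"]
  else if PySem.Str.isIn "washer" s || PySem.Str.isIn "washing" s then normalized ++ ["washer"]
  else if PySem.Str.isIn "dryer" s then normalized ++ ["dryer"]
  else if PySem.Str.isIn "dishwasher" s then normalized ++ ["dishwasher"]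
  else if PySem.Str.isIn "gym" s || PySem.Str.isIn "fitness" s then normalized ++ ["gym"]
  else if PySem.Str.isIn "hot tub" s || PySem.Str.isIn "jacuzzi" s then normalized ++ ["hot_tub"]
  else if PySem.Str.isIn "balcony" s || PySem.Str.isIn "terrace" s then normalized ++ ["balcony"]
  else if PySem.Str.isIn "garden" s || PySem.Str.isIn "yard" s then normalized ++ ["garden"]
  else normalized
def normalize_amenities (amenities_list : List String) : List String :=
  PySem.Set.ofList (amenities_list.foldl pvAstep [])

-- ===== PORT B =====
-- pvRULES is Source B's RULES table (priority, canonical, keyword groups); pvFires is the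
-- _fires helper (for/else over groups = any-of-group, all groups); pvCandidates is the
-- _candidates append loop; pvMinBy is Python's min(..., key=lambda t: t[0]) — the FIRST
-- element with minimal key, as a fold; the set comprehension is the filterMap below.
def pvVALID : List String :=
  ["wifi", "kitchen", "tv", "air_conditioning", "parking", "pool",
   "washer", "dryer", "dishwasher", "gym", "hot_tub", "balcony", "garden"]

def pvRULES : List (Int × String × List (List String)) :=
  [(0, ("wifi", [["wifi", "internet"]])),
   (1, ("kitchen", [["kitchen"]])),
   (2, ("tv", [["tv", "television"]])),
   (3, ("air_conditioning", [["air"], ["con", "cool"]])),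
   (4, ("parking", [["parking", "garage"]])),
   (5, ("pool", [["pool", "swimming"]])),
   (6, ("washer", [["washer", "washing"]])),
   (7, ("dryer", [["dryer"]])),
   (8, ("dishwasher", [["dishwasher"]])),
   (9, ("gym", [["gym", "fitness"]])),
   (10, ("hot_tub", [["hot tub", "jacuzzi"]])),
   (11, ("balcony", [["balcony", "terrace"]])),
   (12, ("garden", [["garden", "yard"]]))]

def pvFires (groups : List (List String)) (s : String) : Bool :=
  groups.all (fun grp => grp.any (fun k => PySem.Str.isIn k s))

def pvCandidates (s : String) : List (Int × String) :=
  pvRULES.foldl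
    (fun cands r => if pvFires r.2.2 s then cands ++ [(r.1, r.2.1)] else cands)
    (if pvVALID.contains s then [((-1 : Int), s)] else [])

def pvMinBy (l : List (Int × String)) : Option (Int × String) :=
  l.foldl (fun acc p =>
    match acc with
    | none => some p
    | some q => if p.1 < q.1 then some p else acc) none

def pvClassify (s : String) : Option String :=
  (pvMinBy (pvCandidates s)).map Prod.snd

def normalize_amenities_alt (amenities_list : List String) : List String :=
  PySem.Set.ofList
    ((amenities_list.map (fun a => pvClassify (PySem.Str.strip (PySem.Str.lower a)))).filterMap id)

-- ===== PRECONDITION & SPEC =====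
def Spec_normalize_amenities (amenities_list : List String) (out : List String) : Prop := out = normalize_amenities_alt amenities_list
instance (amenities_list : List String) (out : List String) : Decidable (Spec_normalize_amenities amenities_list out) := by unfold Spec_normalize_amenities; infer_instance

-- ===== CLAIM (what is proved, stated in full; the proofs are below) =====
def Claim_equal_normalize_amenities : Prop := ∀ (amenities_list : List String), Dom_normalize_amenities amenities_list → Spec_normalize_amenities amenities_list (normalize_amenities amenities_list)

-- ===== LEMMAS AND PROOFS =====

-- the min-fold never moves off an accumulator no later element strictly beats
lemma pvMinBy_stays (l : List (Int × String)) (q : Int × String)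
    (h : ∀ x ∈ l, ¬ x.1 < q.1) :
    l.foldl (fun acc p =>
      match acc with
      | none => some p
      | some r => if p.1 < r.1 then some p else acc) (some q) = some q := by
  induction l with
  | nil => rfl
  | cons x xs ih =>
    simp only [List.foldl_cons]
    rw [if_neg (h x (List.mem_cons_self))]
    exact ih (fun y hy => h y (List.mem_cons_of_mem _ hy))

-- on a list with strictly increasing keys, min-by-key is the head
lemma pvMinBy_head (l : List (Int × String))
    (h : l.Pairwise (fun a b => a.1 < b.1)) :
    pvMinBy l = l.head? := by
  cases l with
  | nil => rfl
  | cons a tl =>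
    unfold pvMinBy
    simp only [List.foldl_cons, List.head?_cons]
    exact pvMinBy_stays tl a
      (fun x hx => not_lt.2 (le_of_lt ((List.pairwise_cons.1 h).1 x hx)))

-- the append loop is a filter+map of the rules table
lemma pvCandidates_eq (s : String) : pvCandidates s =
    (if pvVALID.contains s then [((-1 : Int), s)] else []) ++
      ((pvRULES.filter (fun r => pvFires r.2.2 s)).map (fun r => (r.1, r.2.1))) := by
  unfold pvCandidates
  rw [PySem.List.foldl_append_if]

-- the candidate list has strictly increasing priorities
-- the candidate list has strictly increasing priorities
lemma pvCandidates_pairwise (s : String) :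
    (pvCandidates s).Pairwise (fun a b => a.1 < b.1) := by
  rw [pvCandidates_eq]
  apply List.pairwise_append.2
  refine ⟨?_, ?_, ?_⟩
  · split <;> simp
  · exact List.Pairwise.map _ (fun a b h => h)
      (List.Pairwise.filter _ (l := pvRULES) (by decide))
  · intro a ha b hb
    rcases List.mem_map.1 hb with ⟨r, hr, rfl⟩
    have hr' : r ∈ pvRULES := List.mem_of_mem_filter hr
    have hnn : (0 : Int) ≤ r.1 := by
      fin_cases hr' <;> simp
    have ha1 : a.1 = -1 := by split at ha <;> simp_all
    simp only [ha1]
    omega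

set_option maxHeartbeats 1000000 in
-- closed form of B's classifier: min-priority candidate = head of the (ordered) candidate list
lemma pvClassify_eq (s : String) : pvClassify s =
    (if pvVA.contains s then some s
    else if PySem.Str.isIn "wifi" s || PySem.Str.isIn "internet" s then some "wifi"
    else if PySem.Str.isIn "kitchen" s then some "kitchen"
    else if PySem.Str.isIn "tv" s || PySem.Str.isIn "television" s then some "tv"
    else if PySem.Str.isIn "air" s && (PySem.Str.isIn "con" s || PySem.Str.isIn "cool" s) then some "air_conditioning"
    else if PySem.Str.isIn "parking" s || PySem.Str.isIn "garage" s then some "parking"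
    else if PySem.Str.isIn "pool" s || PySem.Str.isIn "swimming" s then some "pool"
    else if PySem.Str.isIn "washer" s || PySem.Str.isIn "washing" s then some "washer"
    else if PySem.Str.isIn "dryer" s then some "dryer"
    else if PySem.Str.isIn "dishwasher" s then some "dishwasher"
    else if PySem.Str.isIn "gym" s || PySem.Str.isIn "fitness" s then some "gym"
    else if PySem.Str.isIn "hot tub" s || PySem.Str.isIn "jacuzzi" s then some "hot_tub"
    else if PySem.Str.isIn "balcony" s || PySem.Str.isIn "terrace" s then some "balcony"
    else if PySem.Str.isIn "garden" s || PySem.Str.isIn "yard" s then some "garden"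
    else none) := by
  unfold pvClassify
  rw [pvMinBy_head _ (pvCandidates_pairwise s), pvCandidates_eq]
  rw [show pvVALID = pvVA from rfl]
  rw [List.head?_append, List.head?_map, List.head?_filter]
  by_cases hc : pvVA.contains s = true
  · have hm : s ∈ pvVA := by simpa using hc
    simp [hm]
  · have hm : ¬ s ∈ pvVA := by simpa using hc
    simp only [hc, Bool.false_eq_true, if_false, List.head?_nil, Option.none_or,
      Option.map_map]
    simp only [pvRULES, pvFires, List.find?_cons, List.find?_nil, List.all_cons,
      List.all_nil, List.any_cons, List.any_nil, Bool.or_false, Bool.and_true]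
    rcases Bool.eq_false_or_eq_true (PySem.Str.isIn "wifi" s || PySem.Str.isIn "internet" s) with h1 | h1
    · simp only [h1]; simp
    simp only [h1, Bool.false_eq_true, if_false]
    rcases Bool.eq_false_or_eq_true (PySem.Str.isIn "kitchen" s) with h2 | h2
    · simp only [h2]; simp
    simp only [h2, Bool.false_eq_true, if_false]
    rcases Bool.eq_false_or_eq_true (PySem.Str.isIn "tv" s || PySem.Str.isIn "television" s) with h3 | h3
    · simp only [h3]; simp
    simp only [h3, Bool.false_eq_true, if_false]
    rcases Bool.eq_false_or_eq_true (PySem.Str.isIn "air" s && (PySem.Str.isIn "con" s || PySem.Str.isIn "cool" s)) with h4 | h4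
    · simp only [h4]; simp
    simp only [h4, Bool.false_eq_true, if_false]
    rcases Bool.eq_false_or_eq_true (PySem.Str.isIn "parking" s || PySem.Str.isIn "garage" s) with h5 | h5
    · simp only [h5]; simp
    simp only [h5, Bool.false_eq_true, if_false]
    rcases Bool.eq_false_or_eq_true (PySem.Str.isIn "pool" s || PySem.Str.isIn "swimming" s) with h6 | h6
    · simp only [h6]; simp
    simp only [h6, Bool.false_eq_true, if_false]
    rcases Bool.eq_false_or_eq_true (PySem.Str.isIn "washer" s || PySem.Str.isIn "washing" s) with h7 | h7
    · simp only [h7]; simp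
    simp only [h7, Bool.false_eq_true, if_false]
    rcases Bool.eq_false_or_eq_true (PySem.Str.isIn "dryer" s) with h8 | h8
    · simp only [h8]; simp
    simp only [h8, Bool.false_eq_true, if_false]
    rcases Bool.eq_false_or_eq_true (PySem.Str.isIn "dishwasher" s) with h9 | h9
    · simp only [h9]; simp
    simp only [h9, Bool.false_eq_true, if_false]
    rcases Bool.eq_false_or_eq_true (PySem.Str.isIn "gym" s || PySem.Str.isIn "fitness" s) with h10 | h10
    · simp only [h10]; simp
    simp only [h10, Bool.false_eq_true, if_false]
    rcases Bool.eq_false_or_eq_true (PySem.Str.isIn "hot tub" s || PySem.Str.isIn "jacuzzi" s) with h11 | h11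
    · simp only [h11]; simp
    simp only [h11, Bool.false_eq_true, if_false]
    rcases Bool.eq_false_or_eq_true (PySem.Str.isIn "balcony" s || PySem.Str.isIn "terrace" s) with h12 | h12
    · simp only [h12]; simp
    simp only [h12, Bool.false_eq_true, if_false]
    rcases Bool.eq_false_or_eq_true (PySem.Str.isIn "garden" s || PySem.Str.isIn "yard" s) with h13 | h13
    · simp only [h13]; simp
    simp only [h13, Bool.false_eq_true, if_false]
    simp

lemma pv_push (c : Prop) [Decidable c] (acc : List String) (x : String) (o : Option String) :
    acc ++ (if c then some x else o).toList = if c then acc ++ [x] else acc ++ o.toList := by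
  split_ifs <;> rfl

set_option maxHeartbeats 1000000 in
-- A's loop body appends exactly what B's classifier yields
lemma pvAstep_eq_classify (acc : List String) (a : String) :
    pvAstep acc a = acc ++ (pvClassify (PySem.Str.strip (PySem.Str.lower a))).toList := by
  unfold pvAstep
  rw [pvClassify_eq]
  simp only [pv_push, Option.toList_none, List.append_nil]

-- A's loop is B's map/filter: the fold accumulates the classified stream
lemma pvFold_eq_filterMap (l : List String) (acc : List String) :
    l.foldl pvAstep acc =
      acc ++ ((l.map (fun a => pvClassify (PySem.Str.strip (PySem.Str.lower a)))).filterMap id) := by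
  induction l generalizing acc with
  | nil => simp only [List.foldl_nil, List.map_nil, List.filterMap_nil, List.append_nil]
  | cons x xs ih =>
    simp only [List.foldl_cons, List.map_cons, List.filterMap_cons]
    rw [ih, pvAstep_eq_classify]
    cases pvClassify (PySem.Str.strip (PySem.Str.lower x)) <;>
      simp only [Option.toList_some, Option.toList_none, List.append_nil, List.append_assoc,
        List.singleton_append, id_def]

-- ===== VERDICT (by name: the statement is the Claim_ definition above) =====
theorem normalize_amenities_spec : Claim_equal_normalize_amenities := by
  intro l _
  show normalize_amenities l = normalize_amenities_alt l
  unfold normalize_amenities normalize_amenities_alt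
  rw [pvFold_eq_filterMap, List.nil_append]
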